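-- pv_equiv track=rewrite | github.com/alirezaghey/leetcode-solutions | python/number-of-valid-words-for-each-puzzle.py | findNumOfValidWords
-- ===== SOURCE A (Python) =====
-- from typing import List
--
-- import collections
--
-- def findNumOfValidWords(words: List[str], puzzles: List[str]) -> List[int]:
--     def get_bit_mask(word):
--         mask = 0
--         for c in word:
--             mask |= 1 << (ord(c) - ord('a'))
--         return mask
--
--     counter_words = collections.Counter()
--     for word in words:
--         mask = get_bit_mask(word)
--         counter_words[mask] += 1
--
--     res = []
--     for puzzle in puzzles:
--         count = 0
--         fst_letter = 1 << (ord(puzzle[0]) - ord('a'))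
--         mask = get_bit_mask(puzzle)
--         sub_mask = mask
--         while True:
--             if sub_mask & fst_letter:
--                 count += counter_words[sub_mask]
--             sub_mask = (sub_mask - 1) & mask
--             if sub_mask == 0:
--                 break
--         res.append(count)
--     return res
-- ===== SOURCE B (Python) =====
-- def findNumOfValidWords(words, puzzles):
--     def mask(s):
--         m = 0
--         for c in s:
--             m |= 1 << (ord(c) - 97)
--         return m
--     wmasks = [mask(w) for w in words]
--     res = []
--     for p in puzzles:
--         pm = mask(p)
--         fb = 1 << (ord(p[0]) - 97)
--         res.append(sum(1 for wm in wmasks if wm & fb and wm & pm == wm))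
--     return res
-- ===== Notes on version B (the rewrite author's own statement) =====
-- stated objective: alternative
-- what changed: B drops A's Counter-of-masks and per-puzzle submask enumeration ((sub-1)&mask loop) and instead precomputes the list of word bitmasks once and, for each puzzle, directly counts masks wm with wm & first_bit != 0 and wm & puzzle_mask == wm.
import Mathlib
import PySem

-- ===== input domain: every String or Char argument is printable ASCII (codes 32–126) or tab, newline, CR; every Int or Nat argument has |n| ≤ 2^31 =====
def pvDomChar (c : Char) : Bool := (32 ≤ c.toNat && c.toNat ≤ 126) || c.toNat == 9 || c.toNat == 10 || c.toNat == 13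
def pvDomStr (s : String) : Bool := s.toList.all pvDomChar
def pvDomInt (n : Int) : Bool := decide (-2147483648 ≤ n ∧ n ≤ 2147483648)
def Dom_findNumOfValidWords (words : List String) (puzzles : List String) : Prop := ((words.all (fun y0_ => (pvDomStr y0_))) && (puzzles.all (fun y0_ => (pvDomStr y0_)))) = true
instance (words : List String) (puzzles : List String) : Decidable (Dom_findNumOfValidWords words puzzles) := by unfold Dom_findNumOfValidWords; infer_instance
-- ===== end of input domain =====

-- B replaces A's Counter-of-masks + per-puzzle submask enumeration by a precomputed list of
-- word masks and a direct subset-test count per puzzle (alternative algorithm, same values).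

-- ===== PORT A =====
-- get_bit_mask; masks are nonnegative Python ints, kept as Nat.  Exact for chars ≥ 'a'
-- (guaranteed by Pre_): on a smaller char Python raises ValueError (negative shift count).
def pvGetBitMask (word : String) : Nat :=
  word.toList.foldl (fun mask c => mask ||| (1 <<< (c.toNat - 97))) 0

-- the `while True` submask loop: count the counter entry if sub_mask hits fst_letter,
-- step sub_mask := (sub_mask - 1) & mask, break when it reaches 0
def pvSubLoop (counter : PySem.Dict Nat Int) (m f : Nat) (s : Nat) (count : Int) : Int :=
  if (s - 1) &&& m = 0 then
    (if s &&& f ≠ 0 then count + counter.getD s 0 else count)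
  else
    pvSubLoop counter m f ((s - 1) &&& m)
      (if s &&& f ≠ 0 then count + counter.getD s 0 else count)
termination_by s
decreasing_by
  have h1 : (s - 1) &&& m ≤ s - 1 := Nat.and_le_left
  omega

def findNumOfValidWords (words : List String) (puzzles : List String) : List Int :=
  let counter : PySem.Dict Nat Int :=
    words.foldl (fun d w => d.insert (pvGetBitMask w) (d.getD (pvGetBitMask w) 0 + 1))
      PySem.Dict.empty
  puzzles.foldl (fun res p =>
    let f : Nat := match PySem.Str.pyGet? p 0 with
      | some c => 1 <<< (c.toNat - 97)
      | none => 0      -- unreachable under Pre_: Python raises IndexError on an empty puzzle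
    res ++ [pvSubLoop counter (pvGetBitMask p) f (pvGetBitMask p) 0]) []

-- ===== PORT B =====
-- Source B's local helper mask(s) (same remark as for A: exact for chars ≥ 'a', Pre_)
def pvMaskB (s : String) : Nat :=
  s.toList.foldl (fun m c => m ||| (1 <<< (c.toNat - 97))) 0

-- sum(1 for wm in wmasks if wm & fb and wm & pm == wm)  =  countP over the precomputed masks
def findNumOfValidWords_alt (words : List String) (puzzles : List String) : List Int :=
  let wmasks := words.map pvMaskB
  puzzles.map (fun p =>
    let pm := pvMaskB p
    let fb : Nat := match PySem.Str.pyGet? p 0 with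
      | some c => 1 <<< (c.toNat - 97)
      | none => 0      -- unreachable under Pre_: Python raises IndexError on an empty puzzle
    ((wmasks.countP (fun wm => decide (wm &&& fb ≠ 0) && decide (wm &&& pm = wm)) : Nat) : Int))

-- ===== PRECONDITION & SPEC =====
-- Pre_ excludes exactly the inputs where the Pythons raise: a character below 'a' in any word
-- or puzzle (ValueError: negative shift count in 1 << (ord(c) - ord('a'))) and an empty
-- puzzle (IndexError at puzzle[0]).  Both A and B raise there.
def Pre_findNumOfValidWords (words : List String) (puzzles : List String) : Prop :=
  (words.all (fun w => w.toList.all (fun c => decide (97 ≤ c.toNat)))) = true ∧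
  (puzzles.all (fun p => !p.toList.isEmpty && p.toList.all (fun c => decide (97 ≤ c.toNat)))) = true
instance (words : List String) (puzzles : List String) : Decidable (Pre_findNumOfValidWords words puzzles) := by
  unfold Pre_findNumOfValidWords; infer_instance

def pvWitness_findNumOfValidWords : List String × List String :=
  (["ab"], ["a"])

def Spec_findNumOfValidWords (words : List String) (puzzles : List String) (out : List Int) : Prop := out = findNumOfValidWords_alt words puzzles
instance (words : List String) (puzzles : List String) (out : List Int) : Decidable (Spec_findNumOfValidWords words puzzles out) := by unfold Spec_findNumOfValidWords; infer_instance

-- ===== CLAIM (what is proved, stated in full; the proofs are below) =====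
def Claim_equal_findNumOfValidWords : Prop := ∀ (words : List String) (puzzles : List String), Dom_findNumOfValidWords words puzzles → Pre_findNumOfValidWords words puzzles → Spec_findNumOfValidWords words puzzles (findNumOfValidWords words puzzles)

-- ===== LEMMAS AND PROOFS =====

-- the predicate counted by the submask loop, as a function of the loop bound s
def pvQ (m f s t : Nat) : Bool := decide (t &&& m = t ∧ t &&& f ≠ 0 ∧ t ≤ s)

-- bits of s and of s - 1 around the lowest set bit of s
theorem pv_lowbit (s : Nat) (hs : s ≠ 0) :
    ∃ k, s.testBit k = true ∧
      (∀ j, j < k → s.testBit j = false ∧ (s - 1).testBit j = true) ∧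
      (s - 1).testBit k = false ∧
      (∀ j, k < j → (s - 1).testBit j = s.testBit j) := by
  induction s using Nat.strong_induction_on with
  | _ s IH =>
    by_cases hodd : s % 2 = 1
    · refine ⟨0, ?_, ?_, ?_, ?_⟩
      · simp [Nat.testBit_zero, hodd]
      · intro j hj; omega
      · simp [Nat.testBit_zero]; omega
      · intro j hj
        obtain ⟨j', rfl⟩ : ∃ j', j = j' + 1 := ⟨j - 1, by omega⟩
        rw [Nat.testBit_add_one, Nat.testBit_add_one]
        have : (s - 1) / 2 = s / 2 := by omega
        rw [this]
    · have hs2 : s / 2 ≠ 0 := by omega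
      obtain ⟨k, hk, hlow, hk1, hhigh⟩ := IH (s / 2) (by omega) hs2
      have e1 : (s - 1) / 2 = s / 2 - 1 := by omega
      refine ⟨k + 1, ?_, ?_, ?_, ?_⟩
      · rw [Nat.testBit_add_one, hk]
      · intro j hj
        match j with
        | 0 =>
          constructor
          · simp [Nat.testBit_zero]; omega
          · simp [Nat.testBit_zero]; omega
        | j' + 1 =>
          have hj' : j' < k := by omega
          constructor
          · rw [Nat.testBit_add_one]; exact (hlow j' hj').1
          · rw [Nat.testBit_add_one, e1]; exact (hlow j' hj').2
      · rw [Nat.testBit_add_one, e1, hk1]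
      · intro j hj
        obtain ⟨j', rfl⟩ : ∃ j', j = j' + 1 := ⟨j - 1, by omega⟩
        rw [Nat.testBit_add_one, Nat.testBit_add_one, e1]
        exact hhigh j' (by omega)

-- every set bit of a submask is a set bit of the mask
theorem pv_submask_bit {t m : Nat} (ht : t &&& m = t) {j : Nat} (hj : t.testBit j = true) :
    m.testBit j = true := by
  have h := congrArg (fun x => x.testBit j) ht
  simp only [Nat.testBit_and, hj, Bool.true_and] at h
  exact h

-- KEY: (s-1) &&& m is ≥ every submask of m strictly below s
theorem pv_submask_pred_ge (m s t : Nat) (hs : s &&& m = s) (ht : t &&& m = t)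
    (hlt : t < s) : t ≤ (s - 1) &&& m := by
  by_contra hcon
  push Not at hcon
  have hs0 : s ≠ 0 := by omega
  obtain ⟨k, hk, hlow, hk1, hhigh⟩ := pv_lowbit s hs0
  have hne : t ^^^ ((s - 1) &&& m) ≠ 0 := by
    intro h
    have := Nat.xor_eq_zero_iff.mp h
    omega
  obtain ⟨i, hi, hiab⟩ := Nat.exists_most_significant_bit hne
  rw [Nat.testBit_xor] at hi
  have hagree : ∀ j, i < j → t.testBit j = ((s - 1) &&& m).testBit j := by
    intro j hj
    have h2 := hiab j hj
    rw [Nat.testBit_xor] at h2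
    revert h2
    cases t.testBit j <;> cases ((s - 1) &&& m).testBit j <;> simp
  have hti : t.testBit i = true ∧ ((s - 1) &&& m).testBit i = false := by
    cases h1 : t.testBit i
    · have h2 : ((s - 1) &&& m).testBit i = true := by
        revert hi; rw [h1]; cases ((s - 1) &&& m).testBit i <;> simp
      have : t < (s - 1) &&& m := Nat.lt_of_testBit i h1 h2 (fun j hj => hagree j hj)
      omega
    · refine ⟨rfl, ?_⟩
      revert hi; rw [h1]; cases ((s - 1) &&& m).testBit i <;> simp
  obtain ⟨ht_i, hu_i⟩ := hti
  have hm_i : m.testBit i = true := pv_submask_bit ht ht_i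
  have hs1_i : (s - 1).testBit i = false := by
    rw [Nat.testBit_and, hm_i, Bool.and_true] at hu_i
    exact hu_i
  rcases lt_trichotomy i k with h | h | h
  · rw [(hlow i h).2] at hs1_i; exact absurd hs1_i (by simp)
  · subst h
    have hst : s &&& t = s := by
      apply Nat.eq_of_testBit_eq
      intro j
      rw [Nat.testBit_and]
      rcases lt_trichotomy j i with hj | hj | hj
      · simp [(hlow j hj).1]
      · subst hj; simp [hk, ht_i]
      · cases hsj : s.testBit j
        · simp
        · have hmj : m.testBit j = true := pv_submask_bit hs hsj
          have h3 : t.testBit j = true := by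
            rw [hagree j hj, Nat.testBit_and, hhigh j hj, hsj, hmj]; rfl
          simp [h3]
    have : s ≤ t := by
      conv_lhs => rw [← hst]
      exact Nat.and_le_right
    omega
  · have hsi : s.testBit i = false := by rw [← hhigh i h]; exact hs1_i
    have : s < t := by
      apply Nat.lt_of_testBit i hsi ht_i
      intro j hj
      cases hsj : s.testBit j
      · have h4 : t.testBit j = false := by
          rw [hagree j (by omega), Nat.testBit_and, hhigh j (by omega), hsj]
          simp
        rw [h4]
      · have hmj : m.testBit j = true := pv_submask_bit hs hsj
        have h4 : t.testBit j = true := by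
          rw [hagree j (by omega), Nat.testBit_and, hhigh j (by omega), hsj, hmj]; rfl
        rw [h4]
    omega

theorem pvQ_self {m f s : Nat} (hs : s &&& m = s) : pvQ m f s s = decide (s &&& f ≠ 0) := by
  simp [pvQ, hs]

theorem pvQ_next_self {m f s : Nat} (_hs0 : s ≠ 0) : pvQ m f ((s - 1) &&& m) s = false := by
  have h1 : (s - 1) &&& m ≤ s - 1 := Nat.and_le_left
  simp only [pvQ, decide_eq_false_iff_not]
  rintro ⟨-, -, h⟩
  omega

theorem pvQ_zero {m f : Nat} (t : Nat) : pvQ m f 0 t = false := by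
  simp only [pvQ, decide_eq_false_iff_not]
  rintro ⟨h1, h2, h3⟩
  have : t = 0 := by omega
  subst this
  simp [Nat.zero_and] at h2

theorem pvQ_step {m f s : Nat} (hs : s &&& m = s) {t : Nat} (hts : t ≠ s) :
    pvQ m f s t = pvQ m f ((s - 1) &&& m) t := by
  have hle : (s - 1) &&& m ≤ s - 1 := Nat.and_le_left
  simp only [pvQ, decide_eq_decide]
  constructor
  · rintro ⟨h1, h2, h3⟩
    exact ⟨h1, h2, pv_submask_pred_ge m s t hs h1 (by omega)⟩
  · rintro ⟨h1, h2, h3⟩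
    exact ⟨h1, h2, by omega⟩

theorem pv_countP_split (m f s : Nat) (hs : s &&& m = s) (hs0 : s ≠ 0) (l : List Nat) :
    l.countP (pvQ m f s)
      = (if s &&& f ≠ 0 then l.count s else 0) + l.countP (pvQ m f ((s - 1) &&& m)) := by
  induction l with
  | nil => simp
  | cons a l ih =>
    by_cases hat : a = s
    · subst hat
      simp only [List.countP_cons, List.count_cons, ih, pvQ_self hs, pvQ_next_self hs0]
      split_ifs <;> simp_all <;> omega
    · simp only [List.countP_cons, List.count_cons, ih, pvQ_step hs hat]
      have hba : (a == s) = false := by simp [hat]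
      rw [hba]
      split_ifs <;> simp_all <;> omega

-- the Counter of word masks, read back
theorem pv_counter_getD (ws : List String) (d : PySem.Dict Nat Int) (k : Nat) :
    (ws.foldl (fun d w => d.insert (pvGetBitMask w) (d.getD (pvGetBitMask w) 0 + 1)) d).getD k 0
      = d.getD k 0 + ((ws.map pvGetBitMask).count k : Int) := by
  induction ws generalizing d with
  | nil => simp
  | cons w ws ih =>
    simp only [List.foldl_cons, ih, List.map_cons, List.count_cons, PySem.Dict.getD_insert]
    by_cases h : k = pvGetBitMask w
    · subst h
      simp
      ring
    · have : (pvGetBitMask w == k) = false := by simp [Ne.symm h]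
      rw [this]
      simp [h]

-- the submask loop computes the number of word masks that are nonzero-on-f submasks of m below s
theorem pv_loop_eq (L : List Nat) (counter : PySem.Dict Nat Int)
    (hc : ∀ k, counter.getD k 0 = (L.count k : Int)) (m f : Nat) :
    ∀ s, s &&& m = s → s ≠ 0 → ∀ count,
      pvSubLoop counter m f s count = count + (L.countP (pvQ m f s) : Int) := by
  intro s
  induction s using Nat.strong_induction_on with
  | _ s IH =>
    intro hs hs0 count
    rw [pvSubLoop]
    by_cases h0 : (s - 1) &&& m = 0
    · rw [if_pos h0]
      have hsplit := pv_countP_split m f s hs hs0 L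
      rw [h0] at hsplit
      have hz : L.countP (pvQ m f 0) = 0 :=
        List.countP_eq_zero.mpr (fun t _ => by simp [pvQ_zero])
      rw [hz] at hsplit
      rw [hsplit, hc s]
      split_ifs <;> ring
    · rw [if_neg h0]
      have hlt : (s - 1) &&& m < s := by
        have := Nat.and_le_left (n := s - 1) (m := m)
        omega
      have hsub : ((s - 1) &&& m) &&& m = (s - 1) &&& m := by
        rw [Nat.and_assoc, Nat.and_self]
      rw [IH _ hlt hsub h0]
      have hsplit := pv_countP_split m f s hs hs0 L
      rw [hsplit, hc s]
      split_ifs <;> push_cast <;> ring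

theorem pv_mask_ne_zero (p : String) (hp : p.toList ≠ []) : pvGetBitMask p ≠ 0 := by
  obtain ⟨c, cs, hcs⟩ : ∃ c cs, p.toList = c :: cs := by
    cases h : p.toList with
    | nil => exact absurd h hp
    | cons c cs => exact ⟨c, cs, rfl⟩
  have hmono : ∀ (l : List Char) (acc : Nat),
      acc ≤ l.foldl (fun m c => m ||| (1 <<< (c.toNat - 97))) acc := by
    intro l
    induction l with
    | nil => intro acc; simp
    | cons x xs ih =>
      intro acc
      simp only [List.foldl_cons]
      exact le_trans Nat.left_le_or (ih _)
  have h1 : (1 : Nat) <<< (c.toNat - 97) ≠ 0 := by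
    rw [Nat.shiftLeft_eq]
    positivity
  unfold pvGetBitMask
  rw [hcs]
  simp only [List.foldl_cons, Nat.zero_or]
  have hle := hmono cs (1 <<< (c.toNat - 97))
  intro h
  rw [h] at hle
  exact h1 (Nat.le_zero.mp hle)

-- ===== VERDICT (by name: the statement is the Claim_ definition above) =====
theorem findNumOfValidWords_spec : Claim_equal_findNumOfValidWords := by
  intro words puzzles hdom hpre
  unfold Spec_findNumOfValidWords
  unfold findNumOfValidWords findNumOfValidWords_alt
  simp only []
  rw [PySem.List.foldl_append_singleton_eq_map]
  simp only [List.nil_append]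
  apply List.map_congr_left
  intro p hp
  have hpnil : p.toList ≠ [] := by
    have h := List.all_eq_true.mp hpre.2 p hp
    simp only [Bool.and_eq_true, Bool.not_eq_true'] at h
    simpa [List.isEmpty_iff] using h.1
  have hm : pvGetBitMask p ≠ 0 := pv_mask_ne_zero p hpnil
  have hc : ∀ k,
      (words.foldl (fun d w => d.insert (pvGetBitMask w) (d.getD (pvGetBitMask w) 0 + 1))
        PySem.Dict.empty).getD k 0 = ((words.map pvGetBitMask).count k : Int) := by
    intro k
    rw [pv_counter_getD]
    simp
  rw [pv_loop_eq (words.map pvGetBitMask) _ hc (pvGetBitMask p) _ (pvGetBitMask p)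
    (Nat.and_self _) hm 0]
  simp only [zero_add]
  have hmask : pvMaskB = pvGetBitMask := rfl
  rw [hmask, Nat.cast_inj]
  apply List.countP_congr
  intro t _
  simp only [pvQ, decide_eq_true_eq, Bool.and_eq_true, decide_eq_true_eq]
  constructor
  · rintro ⟨h1, h2, h3⟩
    exact ⟨h2, h1⟩
  · rintro ⟨h2, h1⟩
    refine ⟨h1, h2, ?_⟩
    conv_lhs => rw [← h1]
    exact Nat.and_le_right
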